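-- pv_equiv track=rewrite | github.com/darth-pyder/aura-apparel-flask | setup_database.py | get_brand_for_product
-- ===== SOURCE A (Python) =====
-- def get_brand_for_product(name):
--     name = name.lower()
--     if any(keyword in name for keyword in ['athletic', 'compression', 'running', 'track', 'workout', 'leggings', 'jogger', 'sweatpant', 'sleeveless hoodie', 'moisture-wicking', 'tank top']):
--         return "Aura Active"
--     if any(keyword in name for keyword in ['jeans', 'denim']):
--         return "Aura Denim"
--     if any(keyword in name for keyword in ['formal', 'sweater', 'flannel', 'linen', 'tropical', 'cargo', 'trousers', 'bomber', 'leather', 'trench', 'puffer', 'blazer']):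
--         return "Aura Luxe"
--     return "Aura Basics"
-- ===== SOURCE B (Python) =====
-- # Single pass over a flat keyword -> (priority, brand) map, keeping the best
-- # (lowest-priority) matching brand; priority encodes A's branch order.
-- KEYWORD_TABLE = {
--     'athletic': (0, "Aura Active"), 'compression': (0, "Aura Active"),
--     'running': (0, "Aura Active"), 'track': (0, "Aura Active"),
--     'workout': (0, "Aura Active"), 'leggings': (0, "Aura Active"),
--     'jogger': (0, "Aura Active"), 'sweatpant': (0, "Aura Active"),
--     'sleeveless hoodie': (0, "Aura Active"), 'moisture-wicking': (0, "Aura Active"),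
--     'tank top': (0, "Aura Active"),
--     'jeans': (1, "Aura Denim"), 'denim': (1, "Aura Denim"),
--     'formal': (2, "Aura Luxe"), 'sweater': (2, "Aura Luxe"),
--     'flannel': (2, "Aura Luxe"), 'linen': (2, "Aura Luxe"),
--     'tropical': (2, "Aura Luxe"), 'cargo': (2, "Aura Luxe"),
--     'trousers': (2, "Aura Luxe"), 'bomber': (2, "Aura Luxe"),
--     'leather': (2, "Aura Luxe"), 'trench': (2, "Aura Luxe"),
--     'puffer': (2, "Aura Luxe"), 'blazer': (2, "Aura Luxe"),
-- }
--
-- def get_brand_for_product(name):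
--     name = name.lower()
--     best = (3, "Aura Basics")
--     for kw, entry in KEYWORD_TABLE.items():
--         if entry[0] < best[0] and kw in name:
--             best = entry
--     return best[1]
-- ===== Notes on version B (the rewrite author's own statement) =====
-- stated objective: alternative
-- what changed: Instead of three sequential short-circuiting branch blocks, B does a single accumulator pass over a flat keyword->(priority,brand) map, keeping the minimum-priority matching entry; branch precedence becomes numeric priority.
import Mathlib
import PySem

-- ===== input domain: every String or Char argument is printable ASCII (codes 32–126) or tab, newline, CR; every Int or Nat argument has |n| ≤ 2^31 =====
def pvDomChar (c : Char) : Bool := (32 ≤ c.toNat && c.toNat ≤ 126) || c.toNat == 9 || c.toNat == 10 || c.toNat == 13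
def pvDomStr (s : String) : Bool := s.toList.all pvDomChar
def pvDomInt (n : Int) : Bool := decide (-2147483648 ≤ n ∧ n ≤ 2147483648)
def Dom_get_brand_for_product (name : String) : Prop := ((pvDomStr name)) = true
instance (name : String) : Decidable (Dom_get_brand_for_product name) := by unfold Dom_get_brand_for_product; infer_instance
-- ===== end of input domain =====

-- B replaces A's three sequential branch blocks by one accumulator pass over a flat
-- keyword -> (priority, brand) table, keeping the minimum-priority matching entry.

-- ===== PORT A =====
def get_brand_for_product (name : String) : String :=
  let name := PySem.Str.lower name
  if (["athletic", "compression", "running", "track", "workout", "leggings", "jogger", "sweatpant", "sleeveless hoodie", "moisture-wicking", "tank top"].any (fun keyword => PySem.Str.isIn keyword name)) then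
    "Aura Active"
  else if (["jeans", "denim"].any (fun keyword => PySem.Str.isIn keyword name)) then
    "Aura Denim"
  else if (["formal", "sweater", "flannel", "linen", "tropical", "cargo", "trousers", "bomber", "leather", "trench", "puffer", "blazer"].any (fun keyword => PySem.Str.isIn keyword name)) then
    "Aura Luxe"
  else
    "Aura Basics"

-- ===== PORT B =====
def pvKeywordTable : List (String × (Int × String)) :=
  [("athletic", (0, "Aura Active")), ("compression", (0, "Aura Active")),
   ("running", (0, "Aura Active")), ("track", (0, "Aura Active")),
   ("workout", (0, "Aura Active")), ("leggings", (0, "Aura Active")),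
   ("jogger", (0, "Aura Active")), ("sweatpant", (0, "Aura Active")),
   ("sleeveless hoodie", (0, "Aura Active")), ("moisture-wicking", (0, "Aura Active")),
   ("tank top", (0, "Aura Active")),
   ("jeans", (1, "Aura Denim")), ("denim", (1, "Aura Denim")),
   ("formal", (2, "Aura Luxe")), ("sweater", (2, "Aura Luxe")),
   ("flannel", (2, "Aura Luxe")), ("linen", (2, "Aura Luxe")),
   ("tropical", (2, "Aura Luxe")), ("cargo", (2, "Aura Luxe")),
   ("trousers", (2, "Aura Luxe")), ("bomber", (2, "Aura Luxe")),
   ("leather", (2, "Aura Luxe")), ("trench", (2, "Aura Luxe")),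
   ("puffer", (2, "Aura Luxe")), ("blazer", (2, "Aura Luxe"))]

def get_brand_for_product_alt (name : String) : String :=
  let name := PySem.Str.lower name
  let best := pvKeywordTable.foldl
    (fun (best : Int × String) (e : String × (Int × String)) =>
      if e.2.1 < best.1 ∧ PySem.Str.isIn e.1 name = true then e.2 else best)
    ((3 : Int), "Aura Basics")
  best.2

-- ===== PRECONDITION & SPEC =====
def Spec_get_brand_for_product (name : String) (out : String) : Prop := out = get_brand_for_product_alt name
instance (name : String) (out : String) : Decidable (Spec_get_brand_for_product name out) := by unfold Spec_get_brand_for_product; infer_instance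

-- ===== CLAIM (what is proved, stated in full; the proofs are below) =====
def Claim_equal_get_brand_for_product : Prop := ∀ (name : String), Dom_get_brand_for_product name → Spec_get_brand_for_product name (get_brand_for_product name)

-- ===== LEMMAS AND PROOFS =====

-- Folding one constant-priority group (r, brand) over the accumulator: the group
-- replaces the accumulator iff its priority beats it and some keyword matches.
-- Folding one constant-priority group (r, brand) over the accumulator: the group
-- replaces the accumulator iff its priority beats it and some keyword matches.
theorem pv_fold_group (name : String) (kws : List String) (r : Int) (brand : String)
    (acc : Int × String) :
    (kws.map (fun k => (k, (r, brand)))).foldl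
      (fun (best : Int × String) (e : String × (Int × String)) =>
        if e.2.1 < best.1 ∧ PySem.Str.isIn e.1 name = true then e.2 else best) acc
    = if r < acc.1 ∧ kws.any (fun k => PySem.Str.isIn k name) = true then (r, brand) else acc := by
  induction kws generalizing acc with
  | nil => simp
  | cons k kws ih =>
    simp only [List.map_cons, List.foldl_cons, List.any_cons, ih]
    by_cases hk : PySem.Str.isIn k name = true <;>
      by_cases hr : r < acc.1 <;>
        simp only [PySem.Str.isIn_eq] at hk <;>
        simp [hk, hr]

-- The flat table is the concatenation of the three constant-priority groups.
theorem pv_table_eq :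
    pvKeywordTable =
      (["athletic", "compression", "running", "track", "workout", "leggings", "jogger", "sweatpant", "sleeveless hoodie", "moisture-wicking", "tank top"].map (fun k => (k, ((0 : Int), "Aura Active"))))
      ++ (["jeans", "denim"].map (fun k => (k, ((1 : Int), "Aura Denim"))))
      ++ (["formal", "sweater", "flannel", "linen", "tropical", "cargo", "trousers", "bomber", "leather", "trench", "puffer", "blazer"].map (fun k => (k, ((2 : Int), "Aura Luxe")))) := rfl

-- ===== VERDICT (by name: the statement is the Claim_ definition above) =====
theorem get_brand_for_product_spec : Claim_equal_get_brand_for_product := by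
  intro name _
  unfold Spec_get_brand_for_product get_brand_for_product get_brand_for_product_alt
  rw [pv_table_eq]
  simp only [List.foldl_append, pv_fold_group]
  generalize (["athletic", "compression", "running", "track", "workout", "leggings", "jogger", "sweatpant", "sleeveless hoodie", "moisture-wicking", "tank top"].any (fun k => PySem.Str.isIn k (PySem.Str.lower name))) = b0
  generalize (["jeans", "denim"].any (fun k => PySem.Str.isIn k (PySem.Str.lower name))) = b1
  generalize (["formal", "sweater", "flannel", "linen", "tropical", "cargo", "trousers", "bomber", "leather", "trench", "puffer", "blazer"].any (fun k => PySem.Str.isIn k (PySem.Str.lower name))) = b2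
  cases b0 <;> cases b1 <;> cases b2 <;> decide
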